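-- pv_equiv track=rewrite | github.com/jpbot/adventofcode | 2019/advent04a.py | pn_fix_ascend
-- ===== SOURCE A (Python) =====
-- def pn_fix_ascend(p):
-- 	# Change pass number so no digit decreases Left to Right
-- 	s = str(p)
-- 	p = 0
-- 	min = int(s[0])
-- 	incr = False
--
-- 	for i in range(len(s)):
-- 		d = int(s[i])
-- 		if(d >= min and not incr):
-- 			min = d
-- 			p = p + d * 10 ** (len(s) - 1 - i)
-- 		else:
-- 			incr = True
-- 			p = p + min * 10 ** (len(s) - 1 - i)
-- 	return p
-- ===== SOURCE B (Python) =====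
-- def pn_fix_ascend(p):
--     # Binary search (on the monotone predicate "prefix is sorted") for the longest
--     # non-decreasing digit prefix, then pad it with its last digit and re-read.
--     s = str(p)
--     lo, hi = 1, len(s)
--     while lo < hi:
--         mid = (lo + hi + 1) // 2
--         if sorted(s[:mid]) == list(s[:mid]):
--             lo = mid
--         else:
--             hi = mid - 1
--     t = s[:lo] + s[lo - 1] * (len(s) - lo)
--     r = 0
--     for c in t:
--         r = r * 10 + int(c)
--     return r
-- ===== Notes on version B (the rewrite author's own statement) =====
-- stated objective: alternative
-- what changed: B replaces A's single left-to-right accumulator pass (incr flag, per-digit 10**k arithmetic) by a binary search over the monotone predicate 'this prefix is sorted' (tested with sorted()) to find the longest non-decreasing digit prefix, then pads that prefix with its last digit via string repetition and re-reads the number.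
import Mathlib
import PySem

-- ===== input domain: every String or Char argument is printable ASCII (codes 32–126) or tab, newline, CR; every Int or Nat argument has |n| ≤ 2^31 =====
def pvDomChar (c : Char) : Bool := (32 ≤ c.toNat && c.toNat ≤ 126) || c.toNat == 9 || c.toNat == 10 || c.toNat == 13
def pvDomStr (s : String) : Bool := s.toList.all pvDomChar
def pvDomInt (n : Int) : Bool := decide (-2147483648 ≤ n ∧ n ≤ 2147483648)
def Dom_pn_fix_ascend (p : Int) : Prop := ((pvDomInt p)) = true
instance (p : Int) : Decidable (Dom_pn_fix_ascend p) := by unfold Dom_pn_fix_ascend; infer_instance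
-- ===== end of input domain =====

-- B replaces A's one-pass accumulator (incr flag, per-digit 10**k arithmetic) by a binary
-- search over the monotone predicate "this prefix is sorted" for the longest non-decreasing
-- digit prefix, then pads that prefix with its last digit and re-reads the number.

-- int(c) for a single digit character; exact on digit chars, which is all Pre_ admits
def charDigit (c : Char) : Int := (c.toNat : Int) - 48

-- ===== PORT A =====
-- the for-loop of A as structural recursion over the digit list, carrying the index i
-- and the state (p-accumulator `acc`, `min` m, `incr`)
def pnLoopA (n : Nat) : List Int → Nat → Int → Int → Bool → Int
  | [], _, acc, _, _ => acc
  | d :: t, i, acc, m, incr =>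
    if d ≥ m ∧ incr = false then pnLoopA n t (i + 1) (acc + d * 10 ^ (n - 1 - i)) d incr
    else pnLoopA n t (i + 1) (acc + m * 10 ^ (n - 1 - i)) m true

def pn_fix_ascend (p : Int) : Int :=
  let ds := ((PySem.Int.toStr p).toList).map charDigit
  -- min = int(s[0]); str(p) is never empty, so the headD default is unreachable
  pnLoopA ds.length ds 0 0 (ds.headD 0) false

-- ===== PORT B =====
-- Source B's while-loop: binary search for the largest k in [lo,hi] whose prefix s[:k] is
-- sorted, testing each candidate with sorted(s[:mid]) == list(s[:mid])
def bsearchB (s : List Char) (lo hi : Nat) : Nat :=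
  if lo < hi then
    if PySem.List.sorted (s.take ((lo + hi + 1) / 2)) (fun c => c) == s.take ((lo + hi + 1) / 2)
    then bsearchB s ((lo + hi + 1) / 2) hi
    else bsearchB s lo ((lo + hi + 1) / 2 - 1)
  else lo
termination_by hi - lo
decreasing_by all_goals omega

-- Source B's final for-loop over the characters of t: r = r * 10 + int(c)
def hornerC : List Char → Int → Int
  | [], r => r
  | c :: t, r => hornerC t (r * 10 + charDigit c)

def pn_fix_ascend_alt (p : Int) : Int :=
  let s := (PySem.Int.toStr p).toList
  let k := bsearchB s 1 s.length
  -- s[lo-1]: str(p) is never empty and 1 ≤ lo ≤ len(s), so the getD default is unreachable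
  hornerC (s.take k ++ List.replicate (s.length - k) (s.getD (k - 1) 'x')) 0

-- ===== PRECONDITION & SPEC =====
-- Pre_ excludes exactly the negative inputs, where A raises ValueError (int('-') on the sign character).
def Pre_pn_fix_ascend (p : Int) : Prop := 0 ≤ p
instance (p : Int) : Decidable (Pre_pn_fix_ascend p) := by unfold Pre_pn_fix_ascend; infer_instance
def pvWitness_pn_fix_ascend : Int := 223450

def Spec_pn_fix_ascend (p : Int) (out : Int) : Prop := out = pn_fix_ascend_alt p
instance (p : Int) (out : Int) : Decidable (Spec_pn_fix_ascend p out) := by unfold Spec_pn_fix_ascend; infer_instance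

-- ===== CLAIM (what is proved, stated in full; the proofs are below) =====
def Claim_equal_pn_fix_ascend : Prop := ∀ (p : Int), Dom_pn_fix_ascend p → Pre_pn_fix_ascend p → Spec_pn_fix_ascend p (pn_fix_ascend p)

-- ===== LEMMAS AND PROOFS =====

-- the common specification: copy digits while non-decreasing, then fill with the frozen digit
def fixDigits : Int → List Int → List Int
  | _, [] => []
  | m, d :: t => if m ≤ d then d :: fixDigits d t else List.replicate (t.length + 1) m

-- its character-level twin, what B's construct step builds
def fixChars : Char → List Char → List Char
  | _, [] => []
  | m, d :: t => if m ≤ d then d :: fixChars d t else List.replicate (t.length + 1) m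

-- integer Horner evaluation, the value both ports accumulate
def hornerInt : List Int → Int → Int
  | [], r => r
  | d :: t, r => hornerInt t (r * 10 + d)

-- length of the longest non-decreasing run continuing a head character
def mlen : Char → List Char → Nat
  | _, [] => 0
  | a, b :: t => if a ≤ b then mlen b t + 1 else 0

theorem length_fixDigits (m : Int) (t : List Int) : (fixDigits m t).length = t.length := by
  induction t generalizing m with
  | nil => rfl
  | cons d t ih =>
    simp only [fixDigits]
    split
    · simp [ih]
    · simp

theorem hornerInt_shift (t : List Int) : ∀ r : Int, hornerInt t r = r * 10 ^ t.length + hornerInt t 0 := by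
  induction t with
  | nil => intro r; simp [hornerInt]
  | cons d t ih =>
    intro r
    simp only [hornerInt, List.length_cons]
    rw [ih (r * 10 + d), ih (0 * 10 + d)]
    ring

theorem hornerInt_cons (d : Int) (t : List Int) :
    hornerInt (d :: t) 0 = d * 10 ^ t.length + hornerInt t 0 := by
  simp only [hornerInt]
  rw [hornerInt_shift t (0 * 10 + d)]
  ring

-- once incr is set, A fills every remaining position with m
theorem pnLoopA_true (t : List Int) : ∀ (n i : Nat) (acc m : Int), i + t.length = n →
    pnLoopA n t i acc m true = acc + hornerInt (List.replicate t.length m) 0 := by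
  induction t with
  | nil => intro n i acc m _; simp [pnLoopA, hornerInt]
  | cons d t ih =>
    intro n i acc m h
    simp only [pnLoopA, and_false, if_false, reduceCtorEq]
    rw [ih n (i + 1) _ m (by simp at h ⊢; omega)]
    have hn : n - 1 - i = t.length := by simp at h; omega
    simp only [List.length_cons, List.replicate_succ, hornerInt_cons, List.length_replicate, hn]
    ring

theorem pnLoopA_false (t : List Int) : ∀ (n i : Nat) (acc m : Int), i + t.length = n →
    pnLoopA n t i acc m false = acc + hornerInt (fixDigits m t) 0 := by
  induction t with
  | nil => intro n i acc m _; simp [pnLoopA, fixDigits, hornerInt]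
  | cons d t ih =>
    intro n i acc m h
    have hn : n - 1 - i = t.length := by simp at h; omega
    simp only [pnLoopA, fixDigits, and_true, ge_iff_le]
    split
    · rw [ih n (i + 1) _ d (by simp at h ⊢; omega)]
      rw [hornerInt_cons, length_fixDigits, hn]
      ring
    · rw [pnLoopA_true t n (i + 1) _ m (by simp at h ⊢; omega)]
      rw [List.replicate_succ, hornerInt_cons, List.length_replicate, hn]
      ring

-- char order agrees with the order of the digit values int(c) computes
theorem charDigit_le_iff (a b : Char) : charDigit a ≤ charDigit b ↔ a ≤ b := by
  simp only [charDigit, Char.le_def, UInt32.le_iff_toNat_le, Char.toNat]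
  omega

theorem mlen_le (a : Char) (t : List Char) : mlen a t ≤ t.length := by
  induction t generalizing a with
  | nil => simp [mlen]
  | cons b t ih =>
    simp only [mlen, List.length_cons]
    split
    · have := ih b; omega
    · omega

-- the prefix of length k of a :: t is non-decreasing exactly when k ≤ mlen a t + 1
theorem pairwise_take_iff (t : List Char) : ∀ (a : Char) (k : Nat), k ≤ t.length + 1 →
    (((a :: t).take k).Pairwise (· ≤ ·) ↔ k ≤ mlen a t + 1) := by
  induction t with
  | nil =>
    intro a k hk
    simp only [List.length_nil] at hk
    interval_cases k <;> simp [mlen]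
  | cons b t ih =>
    intro a k hk
    match k with
    | 0 => simp
    | 1 =>
      constructor
      · intro _; omega
      · intro _; simp
    | k + 2 =>
      rw [List.take_succ_cons, List.pairwise_cons, mlen]
      constructor
      · rintro ⟨hle, hp⟩
        have hab : a ≤ b := hle b (by rw [List.take_succ_cons]; exact List.mem_cons_self ..)
        rw [if_pos hab]
        have := (ih b (k + 1) (by simp at hk ⊢; omega)).mp hp
        omega
      · intro hle
        split at hle
        next hab =>
          have hp : ((b :: t).take (k + 1)).Pairwise (· ≤ ·) :=
            (ih b (k + 1) (by simp at hk ⊢; omega)).mpr (by omega)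
          refine ⟨?_, hp⟩
          intro c hc
          rw [List.take_succ_cons] at hc hp
          rcases List.mem_cons.mp hc with rfl | hc'
          · exact hab
          · exact le_trans hab ((List.pairwise_cons.mp hp).1 c hc')
        next => omega

-- sorted(l) == list(l) is exactly "l is non-decreasing"
theorem sortedBeq_iff (l : List Char) :
    (PySem.List.sorted l (fun c => c) == l) = true ↔ l.Pairwise (· ≤ ·) := by
  rw [beq_iff_eq]
  constructor
  · intro h
    have := PySem.List.sorted_pairwise l (fun c => c)
    rw [h] at this
    simpa using this
  · intro h
    exact PySem.List.sorted_eq_self_of_pairwise l _ (by simpa using h)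

-- Source B's binary search returns the length of the longest non-decreasing prefix
theorem bsearchB_eq (a : Char) (t : List Char) (lo hi : Nat)
    (h1 : lo ≤ mlen a t + 1) (h2 : mlen a t + 1 ≤ hi) (h3 : hi ≤ t.length + 1) :
    bsearchB (a :: t) lo hi = mlen a t + 1 := by
  by_cases hlt : lo < hi
  · rw [bsearchB, if_pos hlt]
    have hm1 : lo < (lo + hi + 1) / 2 := by omega
    have hm2 : (lo + hi + 1) / 2 ≤ hi := by omega
    by_cases hs : (((a :: t).take ((lo + hi + 1) / 2)).Pairwise (· ≤ ·))
    · rw [if_pos ((sortedBeq_iff _).mpr hs)]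
      have hle : (lo + hi + 1) / 2 ≤ mlen a t + 1 :=
        (pairwise_take_iff t a _ (by omega)).mp hs
      exact bsearchB_eq a t ((lo + hi + 1) / 2) hi hle h2 h3
    · rw [if_neg (fun hh => hs ((sortedBeq_iff _).mp hh))]
      have hgt : ¬ ((lo + hi + 1) / 2 ≤ mlen a t + 1) :=
        fun hc => hs ((pairwise_take_iff t a _ (by omega)).mpr hc)
      exact bsearchB_eq a t lo ((lo + hi + 1) / 2 - 1) h1 (by omega) (by omega)
  · rw [bsearchB, if_neg hlt]
    omega
termination_by hi - lo
decreasing_by all_goals omega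

-- B's take-then-pad construct is exactly the frozen-fill list
theorem construct_eq_fixChars (t : List Char) : ∀ a : Char,
    (a :: t).take (mlen a t + 1) ++
      List.replicate (t.length - mlen a t) ((a :: t).getD (mlen a t) 'x')
    = fixChars a (a :: t) := by
  induction t with
  | nil => intro a; simp [mlen, fixChars]
  | cons b t ih =>
    intro a
    by_cases hab : a ≤ b
    · simp only [mlen, if_pos hab]
      rw [List.take_succ_cons, List.getD_cons_succ]
      have : (b :: t).length - (mlen b t + 1) = t.length - mlen b t := by
        simp only [List.length_cons]; omega
      rw [this, List.cons_append, ih b]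
      simp [fixChars, hab]
    · simp [mlen, hab, fixChars, List.replicate_succ]

-- mapping int(c) over the frozen-fill characters gives the frozen-fill digits
theorem map_fixChars (l : List Char) : ∀ m : Char,
    (fixChars m l).map charDigit = fixDigits (charDigit m) (l.map charDigit) := by
  induction l with
  | nil => intro m; simp [fixChars, fixDigits]
  | cons d t ih =>
    intro m
    simp only [fixChars, fixDigits, List.map_cons, List.length_map]
    by_cases h : m ≤ d
    · rw [if_pos h, if_pos ((charDigit_le_iff m d).mpr h), List.map_cons, ih d]
    · rw [if_neg h, if_neg (fun hc => h ((charDigit_le_iff m d).mp hc)), List.map_replicate]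

theorem hornerC_eq (l : List Char) : ∀ r : Int, hornerC l r = hornerInt (l.map charDigit) r := by
  induction l with
  | nil => intro r; rfl
  | cons c t ih => intro r; simp only [hornerC, List.map_cons, hornerInt, ih]

-- the two ports agree on the digit-character list of str(p), whatever it is
theorem ports_eq (s : List Char) :
    pnLoopA (s.map charDigit).length (s.map charDigit) 0 0 ((s.map charDigit).headD 0) false
    = hornerC (s.take (bsearchB s 1 s.length) ++
        List.replicate (s.length - bsearchB s 1 s.length)
          (s.getD (bsearchB s 1 s.length - 1) 'x')) 0 := by
  cases s with
  | nil => simp [bsearchB, pnLoopA, hornerC]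
  | cons a t =>
    have hk : bsearchB (a :: t) 1 (a :: t).length = mlen a t + 1 :=
      bsearchB_eq a t 1 (a :: t).length (by omega)
        (by have := mlen_le a t; simp only [List.length_cons]; omega)
        (by simp)
    rw [hk, pnLoopA_false _ _ 0 0 _ (by simp), Nat.add_sub_cancel]
    have hlen : (a :: t).length - (mlen a t + 1) = t.length - mlen a t := by
      simp only [List.length_cons]; omega
    rw [hlen, construct_eq_fixChars t a, hornerC_eq, map_fixChars]
    simp [fixDigits]

-- ===== VERDICT (by name: the statement is the Claim_ definition above) =====
theorem pn_fix_ascend_spec : Claim_equal_pn_fix_ascend := by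
  intro p _ _
  show pn_fix_ascend p = pn_fix_ascend_alt p
  unfold pn_fix_ascend pn_fix_ascend_alt
  exact ports_eq ((PySem.Int.toStr p).toList)
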